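-- pv_equiv track=rewrite | github.com/guibuzi/bioinfo | nCov/plot_panel.py | fragment
-- ===== SOURCE A (Python) =====
-- def fragment(hits, inter_length=3, min_length=3):
--     fragments = []
--     start = hits[0]
--     for i in range(len(hits) - 1):
--         if hits[i + 1] > hits[i] + inter_length:
--             end = hits[i] + inter_length - 1
--             fragments.append((start, end, end - start + 1))
--             start = hits[i + 1]
--     else:
--         end = hits[-1] + inter_length - 1
--         fragments.append((start, end, end - start + 1))
--     return [fragment for fragment in fragments if fragment[2] > min_length]
-- ===== SOURCE B (Python) =====
-- def fragment(hits, inter_length=3, min_length=3):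
--     # Columnar approach: compute the split indices, then build the starts and
--     # ends columns directly and zip them; no running accumulator state.
--     gaps = [i for i in range(1, len(hits)) if hits[i] > hits[i - 1] + inter_length]
--     starts = [hits[0]] + [hits[i] for i in gaps]
--     ends = [hits[i - 1] + inter_length - 1 for i in gaps] + [hits[-1] + inter_length - 1]
--     return [(s, e, e - s + 1) for s, e in zip(starts, ends) if e - s + 1 > min_length]
-- ===== Notes on version B (the rewrite author's own statement) =====
-- stated objective: alternative
-- what changed: Replaces A's single stateful scan (running start variable, appended closed fragments, for-else final append) by a columnar construction: compute the list of split indices, build the starts and ends columns from them, and zip/filter the columns.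
import Mathlib
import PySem

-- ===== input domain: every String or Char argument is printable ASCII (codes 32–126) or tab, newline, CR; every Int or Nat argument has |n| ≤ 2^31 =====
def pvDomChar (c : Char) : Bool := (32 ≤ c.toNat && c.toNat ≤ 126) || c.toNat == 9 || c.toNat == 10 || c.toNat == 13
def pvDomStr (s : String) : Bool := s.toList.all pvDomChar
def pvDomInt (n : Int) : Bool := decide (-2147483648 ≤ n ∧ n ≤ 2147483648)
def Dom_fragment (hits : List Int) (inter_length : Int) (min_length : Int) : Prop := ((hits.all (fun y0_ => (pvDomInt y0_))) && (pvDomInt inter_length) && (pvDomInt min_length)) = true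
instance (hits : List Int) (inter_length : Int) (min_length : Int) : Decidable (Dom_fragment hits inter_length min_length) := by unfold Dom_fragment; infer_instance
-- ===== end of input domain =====

-- B replaces A's stateful scan by a columnar construction (split indices, then zipped
-- starts/ends columns); same O(n) cost, a different decomposition.

-- ===== PORT A =====
-- A's loop body (the if inside the for over range(len(hits)-1)); pyGetD is exact here: the loop
-- only reads indices between 0 and len-1, which are in range.
def stepA (hits : List Int) (inter_length : Int)
    (s : List (Int × Int × Int) × Int) (i : Int) : List (Int × Int × Int) × Int :=
  if PySem.List.pyGetD hits (i + 1) 0 > PySem.List.pyGetD hits i 0 + inter_length then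
    let e := PySem.List.pyGetD hits i 0 + inter_length - 1
    (s.1 ++ [(s.2, e, e - s.2 + 1)], PySem.List.pyGetD hits (i + 1) 0)
  else s

def fragment (hits : List Int) (inter_length : Int) (min_length : Int) : List (Int × Int × Int) :=
  let start := PySem.List.pyGetD hits 0 0     -- hits[0]; Pre_ excludes the empty list (IndexError)
  let st := (PySem.List.pyRange 0 ((hits.length : Int) - 1) 1).foldl (stepA hits inter_length) ([], start)
  let e := PySem.List.pyGetD hits (-1) 0 + inter_length - 1
  (st.1 ++ [(st.2, e, e - st.2 + 1)]).filter (fun f => f.2.2 > min_length)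

-- ===== PORT B =====
def fragment_alt (hits : List Int) (inter_length : Int) (min_length : Int) : List (Int × Int × Int) :=
  let gaps := (PySem.List.pyRange 1 (hits.length : Int) 1).filter
    (fun i => PySem.List.pyGetD hits i 0 > PySem.List.pyGetD hits (i - 1) 0 + inter_length)
  let starts := PySem.List.pyGetD hits 0 0 :: gaps.map (fun i => PySem.List.pyGetD hits i 0)
  let ends := gaps.map (fun i => PySem.List.pyGetD hits (i - 1) 0 + inter_length - 1)
      ++ [PySem.List.pyGetD hits (-1) 0 + inter_length - 1]
  ((starts.zip ends).filter (fun p => p.2 - p.1 + 1 > min_length)).map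
    (fun p => (p.1, p.2, p.2 - p.1 + 1))

-- ===== PRECONDITION & SPEC =====
-- Pre_ excludes only the empty list, on which Python A (and B) raise IndexError reading hits[0].
def Pre_fragment (hits : List Int) (inter_length : Int) (min_length : Int) : Prop := hits ≠ []
instance (hits : List Int) (inter_length : Int) (min_length : Int) : Decidable (Pre_fragment hits inter_length min_length) := by unfold Pre_fragment; infer_instance
def pvWitness_fragment : List Int × Int × Int := ([1, 2, 9, 10], 3, 3)

def Spec_fragment (hits : List Int) (inter_length : Int) (min_length : Int) (out : List (Int × Int × Int)) : Prop := out = fragment_alt hits inter_length min_length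
instance (hits : List Int) (inter_length : Int) (min_length : Int) (out : List (Int × Int × Int)) : Decidable (Spec_fragment hits inter_length min_length out) := by unfold Spec_fragment; infer_instance

-- ===== CLAIM (what is proved, stated in full; the proofs are below) =====
def Claim_equal_fragment : Prop := ∀ (hits : List Int) (inter_length : Int) (min_length : Int), Dom_fragment hits inter_length min_length → Pre_fragment hits inter_length min_length → Spec_fragment hits inter_length min_length (fragment hits inter_length min_length)

-- ===== LEMMAS AND PROOFS =====

-- Structural (adjacent-pair) form of A's index loop.
def loopA (il : Int) (s : List (Int × Int × Int) × Int) : Int → List Int → List (Int × Int × Int) × Int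
  | _, [] => s
  | a, b :: r =>
      loopA il (if b > a + il then (s.1 ++ [(s.2, a + il - 1, a + il - 1 - s.2 + 1)], b) else s) b r

-- The list of gap pairs (hits[i-1], hits[i]) at split positions, structurally.
def gapPairs (il : Int) : Int → List Int → List (Int × Int)
  | _, [] => []
  | a, b :: r => if b > a + il then (a, b) :: gapPairs il b r else gapPairs il b r

-- The run pairs (start, last-of-run) a canonical structural scan produces.
def runPairs (il : Int) : Int → Int → List Int → List (Int × Int)
  | start, a, [] => [(start, a)]
  | start, a, b :: r => if b > a + il then (start, a) :: runPairs il b b r else runPairs il start b r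

-- A's pyRange fold equals loopA (prefix-generalised).
lemma bridgeA (il : Int) : ∀ (t pre : List Int) (a : Int) (s : List (Int × Int × Int) × Int),
    (PySem.List.pyRange (pre.length : Int) ((pre.length : Int) + (t.length : Int)) 1).foldl
      (stepA (pre ++ a :: t) il) s = loopA il s a t := by
  intro t
  induction t with
  | nil => intro pre a s; simp [PySem.List.pyRange_one_eq_nil, loopA]
  | cons b r ih =>
    intro pre a s
    rw [PySem.List.pyRange_one_cons (by push_cast [List.length_cons]; omega)]
    simp only [List.foldl_cons]
    have h1 : PySem.List.pyGetD (pre ++ a :: b :: r) (pre.length : Int) 0 = a := by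
      simpa using PySem.List.pyGetD_natCast (pre ++ a :: b :: r) pre.length 0
    have h2 : PySem.List.pyGetD (pre ++ a :: b :: r) ((pre.length : Int) + 1) 0 = b := by
      have := PySem.List.pyGetD_natCast (pre ++ a :: b :: r) (pre.length + 1) 0
      push_cast at this
      simpa [List.getD_append_right, Nat.sub_self] using this
    have hstep : stepA (pre ++ a :: b :: r) il s (pre.length : Int)
        = (if b > a + il then (s.1 ++ [(s.2, a + il - 1, a + il - 1 - s.2 + 1)], b) else s) := by
      simp only [stepA, h1, h2]
    have e1 : ((pre.length : Int) + 1) = ((pre ++ [a]).length : Int) := by simp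
    have e2 : ((pre.length : Int) + ((b :: r).length : Int))
        = ((pre ++ [a]).length : Int) + (r.length : Int) := by
      simp only [List.length_cons, List.length_append, List.length_nil]
      push_cast; omega
    have hrw : pre ++ a :: b :: r = (pre ++ [a]) ++ b :: r := by simp
    rw [e1, e2, hstep, hrw, ih (pre ++ [a]) b]
    simp only [loopA]

-- loopA plus the final for-else append yields exactly the mapped run pairs.
lemma loopA_runPairs (il : Int) : ∀ (t : List Int) (a : Int) (s : List (Int × Int × Int) × Int),
    (loopA il s a t).1 ++ [((loopA il s a t).2, (a :: t).getLast (by simp) + il - 1,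
        (a :: t).getLast (by simp) + il - 1 - (loopA il s a t).2 + 1)]
      = s.1 ++ (runPairs il s.2 a t).map (fun p => (p.1, p.2 + il - 1, p.2 + il - 1 - p.1 + 1)) := by
  intro t
  induction t with
  | nil => intro a s; simp [loopA, runPairs]
  | cons b r ih =>
    intro a s
    simp only [loopA, runPairs]
    by_cases h : b > a + il
    · simp only [if_pos h]
      rw [show (a :: b :: r).getLast (by simp) = (b :: r).getLast (by simp) from by
        simp [List.getLast_cons]]
      rw [ih b (s.1 ++ [(s.2, a + il - 1, a + il - 1 - s.2 + 1)], b)]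
      simp [List.append_assoc]
    · simp only [if_neg h]
      rw [show (a :: b :: r).getLast (by simp) = (b :: r).getLast (by simp) from by
        simp [List.getLast_cons]]
      exact ih b s

-- B's filtered index range, mapped to its (prev, cur) value pairs, equals gapPairs
-- (prefix-generalised).
lemma bridgeGaps (il : Int) : ∀ (t pre : List Int) (a : Int),
    (((PySem.List.pyRange ((pre.length : Int) + 1)
        ((pre.length : Int) + 1 + (t.length : Int)) 1).filter
      (fun i => PySem.List.pyGetD (pre ++ a :: t) i 0
          > PySem.List.pyGetD (pre ++ a :: t) (i - 1) 0 + il)).map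
      (fun i => (PySem.List.pyGetD (pre ++ a :: t) (i - 1) 0,
                 PySem.List.pyGetD (pre ++ a :: t) i 0)))
      = gapPairs il a t := by
  intro t
  induction t with
  | nil => intro pre a; simp [PySem.List.pyRange_one_eq_nil, gapPairs]
  | cons b r ih =>
    intro pre a
    rw [PySem.List.pyRange_one_cons (by push_cast [List.length_cons]; omega)]
    have h1 : PySem.List.pyGetD (pre ++ a :: b :: r) ((pre.length : Int) + 1 - 1) 0 = a := by
      simpa using PySem.List.pyGetD_natCast (pre ++ a :: b :: r) pre.length 0
    have h2 : PySem.List.pyGetD (pre ++ a :: b :: r) ((pre.length : Int) + 1) 0 = b := by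
      have := PySem.List.pyGetD_natCast (pre ++ a :: b :: r) (pre.length + 1) 0
      push_cast at this
      simpa [List.getD_append_right, Nat.sub_self] using this
    have hrw : pre ++ a :: b :: r = (pre ++ [a]) ++ b :: r := by simp
    have e1 : ((pre.length : Int) + 1 + 1) = ((pre ++ [a]).length : Int) + 1 := by
      push_cast [List.length_append, List.length_cons, List.length_nil]; omega
    have e2 : ((pre.length : Int) + 1 + ((b :: r).length : Int))
        = ((pre ++ [a]).length : Int) + 1 + (r.length : Int) := by
      push_cast [List.length_append, List.length_cons, List.length_nil]; omega
    simp only [List.filter_cons, h1, h2, gapPairs]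
    by_cases h : b > a + il
    · rw [if_pos (decide_eq_true h)]
      simp only [List.map_cons, h1, h2, if_pos h]
      congr 1
      rw [e1, e2, hrw]
      exact ih (pre ++ [a]) b
    · rw [if_neg (by simpa using h), if_neg h, e1, e2, hrw]
      exact ih (pre ++ [a]) b

-- Zipping the starts column against the ends column reconstructs the run pairs.
lemma zipRuns (il : Int) : ∀ (t : List Int) (a start : Int),
    (start :: (gapPairs il a t).map Prod.snd).zip
        ((gapPairs il a t).map (fun p => p.1 + il - 1) ++ [(a :: t).getLast (by simp) + il - 1])
      = (runPairs il start a t).map (fun p => (p.1, p.2 + il - 1)) := by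
  intro t
  induction t with
  | nil => intro a start; simp [gapPairs, runPairs]
  | cons b r ih =>
    intro a start
    simp only [gapPairs, runPairs]
    rw [show (a :: b :: r).getLast (by simp) = (b :: r).getLast (by simp) from by
      simp [List.getLast_cons]]
    by_cases h : b > a + il
    · simp only [if_pos h, List.map_cons, List.cons_append, List.zip_cons_cons]
      rw [ih b b]
    · simp only [if_neg h]
      exact ih b start

theorem fragment_spec : Claim_equal_fragment := by
  intro hits il ml _ hpre
  obtain ⟨h, t, rfl⟩ : ∃ h t, hits = h :: t := by
    cases hits with
    | nil => exact absurd rfl hpre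
    | cons h t => exact ⟨h, t, rfl⟩
  have h0 : PySem.List.pyGetD (h :: t) 0 0 = h := by simp [PySem.List.pyGetD_zero_cons]
  have hlast : PySem.List.pyGetD (h :: t) (-1) 0 = (h :: t).getLast (by simp) := by
    rw [PySem.List.pyGetD_neg_one]
  -- A side
  have hb := bridgeA il t [] h ([], h)
  simp only [List.nil_append, List.length_nil, Nat.cast_zero, zero_add] at hb
  have hlen : (((h :: t).length : Int) - 1) = (t.length : Int) := by simp
  have hA := loopA_runPairs il t h ([], h)
  simp only [List.nil_append] at hA
  -- B side
  have hg := bridgeGaps il t [] h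
  simp only [List.nil_append, List.length_nil, Nat.cast_zero, zero_add] at hg
  have hz := zipRuns il t h h
  have hlenc : (((h :: t).length : Int)) = 1 + (t.length : Int) := by
    push_cast [List.length_cons]; ring
  have hstarts : (((PySem.List.pyRange 1 (1 + (t.length : Int)) 1).filter
      (fun i => PySem.List.pyGetD (h :: t) i 0
          > PySem.List.pyGetD (h :: t) (i - 1) 0 + il)).map
      (fun i => PySem.List.pyGetD (h :: t) i 0)) = (gapPairs il h t).map Prod.snd := by
    rw [← hg, List.map_map]; rfl
  have hends : (((PySem.List.pyRange 1 (1 + (t.length : Int)) 1).filter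
      (fun i => PySem.List.pyGetD (h :: t) i 0
          > PySem.List.pyGetD (h :: t) (i - 1) 0 + il)).map
      (fun i => PySem.List.pyGetD (h :: t) (i - 1) 0 + il - 1))
      = (gapPairs il h t).map (fun p => p.1 + il - 1) := by
    rw [← hg, List.map_map]; rfl
  simp only [Spec_fragment, fragment, fragment_alt, h0, hlast, hlen, hb]
  rw [hA, hlenc, hstarts, hends, hz]
  rw [List.filter_map, List.filter_map, List.map_map]
  rfl
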